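-- pv_equiv track=rewrite | github.com/Kreijstal/openmfc | tests/abi_safety/test_core_logic.py | check_exports_for_msvc_mangling
-- ===== SOURCE A (Python) =====
-- def check_exports_for_msvc_mangling(exports_text):
--     """
--     Core logic from test_msvc_abi_simple.sh
--     Returns (is_valid, message)
--     """
--     lines = exports_text.strip().split('\n')
--     exports = []
--
--     # Parse exports (simplified)
--     for line in lines:
--         line = line.strip()
--         if not line:
--             continue
--         # Assume each line is an export name
--         exports.append(line)
--
--     total = len(exports)
--     msvc_count = sum(1 for e in exports if e.startswith('?'))
--     gcc_count = sum(1 for e in exports if e.startswith('_Z'))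
--
--     # Check 1: Must have enough MSVC-mangled names
--     if msvc_count < 100:
--         return False, f"Not enough MSVC-mangled exports (need 100+, got {msvc_count})"
--
--     # Check 2: Must NOT have GCC-mangled names
--     if gcc_count > 0:
--         return False, f"Found {gcc_count} GCC-mangled exports"
--
--     # Check 3: Key MSVC symbols must be present
--     key_symbols = [
--         "?AfxThrowMemoryException@@YAXXZ",
--         "?AfxThrowFileException@@YAXHJPB_W@Z",
--         "?AfxThrowNotSupportedException@@YAXXZ",
--         "?AfxThrowInvalidArgException@@YAXXZ",
--         "?AfxAbort@@YAXXZ",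
--     ]
--
--     missing = []
--     for symbol in key_symbols:
--         if not any(symbol in e for e in exports):
--             missing.append(symbol)
--
--     if missing:
--         return False, f"Missing key symbols: {', '.join(missing)}"
--
--     return True, f"OK: {msvc_count} MSVC, {gcc_count} GCC, all keys present"
-- ===== SOURCE B (Python) =====
-- def check_exports_for_msvc_mangling(exports_text):
--     key_symbols = [
--         "?AfxThrowMemoryException@@YAXXZ",
--         "?AfxThrowFileException@@YAXHJPB_W@Z",
--         "?AfxThrowNotSupportedException@@YAXXZ",
--         "?AfxThrowInvalidArgException@@YAXXZ",
--         "?AfxAbort@@YAXXZ",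
--     ]
--     msvc_count = 0
--     gcc_count = 0
--     found = set()
--     # single pass: count manglings and spot key symbols line by line
--     for line in exports_text.strip().split('\n'):
--         line = line.strip()
--         if not line:
--             continue
--         if line.startswith('?'):
--             msvc_count += 1
--         if line.startswith('_Z'):
--             gcc_count += 1
--         for symbol in key_symbols:
--             if symbol in line:
--                 found.add(symbol)
--     if msvc_count < 100:
--         return False, f"Not enough MSVC-mangled exports (need 100+, got {msvc_count})"
--     if gcc_count > 0:
--         return False, f"Found {gcc_count} GCC-mangled exports"
--     missing = [s for s in key_symbols if s not in found]
--     if missing: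
--         return False, f"Missing key symbols: {', '.join(missing)}"
--     return True, f"OK: {msvc_count} MSVC, {gcc_count} GCC, all keys present"
-- ===== Notes on version B (the rewrite author's own statement) =====
-- stated objective: alternative
-- what changed: B makes a single pass over the stripped non-empty lines, maintaining both mangling counters and a found-set of key symbols, instead of A's separate parse pass, two sum-scans and a nested any-scan over the materialised export list; the three checks and all messages are unchanged.
import Mathlib
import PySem

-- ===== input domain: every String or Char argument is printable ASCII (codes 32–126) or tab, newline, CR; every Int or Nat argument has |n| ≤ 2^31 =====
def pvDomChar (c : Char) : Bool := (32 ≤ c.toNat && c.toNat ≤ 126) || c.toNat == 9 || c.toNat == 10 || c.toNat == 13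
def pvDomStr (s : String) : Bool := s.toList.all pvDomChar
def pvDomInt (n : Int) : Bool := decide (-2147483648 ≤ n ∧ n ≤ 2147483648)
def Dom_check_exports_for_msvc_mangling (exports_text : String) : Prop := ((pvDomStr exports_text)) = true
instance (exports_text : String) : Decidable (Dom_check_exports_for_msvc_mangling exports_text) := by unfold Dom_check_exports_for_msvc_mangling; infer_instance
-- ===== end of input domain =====

-- B replaces A's four separate scans (parse pass, two sum-scans, nested any-scan) by one pass over the
-- stripped non-empty lines maintaining the two counters and a found-set of key symbols (objective: alternative).


-- the key_symbols list both Pythons spell out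
def pvKeySymbols : List String :=
  [ "?AfxThrowMemoryException@@YAXXZ",
    "?AfxThrowFileException@@YAXHJPB_W@Z",
    "?AfxThrowNotSupportedException@@YAXXZ",
    "?AfxThrowInvalidArgException@@YAXXZ",
    "?AfxAbort@@YAXXZ" ]

-- ===== PORT A =====
def check_exports_for_msvc_mangling (exports_text : String) : Bool × String :=
  let lines := (PySem.Str.split? (PySem.Str.strip exports_text) "\n").getD []  -- sep ≠ "", always some
  let exports := lines.foldl (fun acc line =>
      let line := PySem.Str.strip line
      if line = "" then acc else acc ++ [line]) []
  let msvc_count : Int := exports.foldl (fun n e => n + if PySem.Str.startswith e "?" then 1 else 0) 0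
  let gcc_count : Int := exports.foldl (fun n e => n + if PySem.Str.startswith e "_Z" then 1 else 0) 0
  if msvc_count < 100 then
    (false, "Not enough MSVC-mangled exports (need 100+, got " ++ PySem.Int.toStr msvc_count ++ ")")
  else if gcc_count > 0 then
    (false, "Found " ++ PySem.Int.toStr gcc_count ++ " GCC-mangled exports")
  else
    let missing := pvKeySymbols.foldl (fun acc symbol =>
        if exports.any (fun e => PySem.Str.isIn symbol e) then acc else acc ++ [symbol]) []
    if missing ≠ [] then
      (false, "Missing key symbols: " ++ PySem.Str.join ", " missing)
    else
      (true, "OK: " ++ PySem.Int.toStr msvc_count ++ " MSVC, " ++ PySem.Int.toStr gcc_count ++ " GCC, all keys present")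

-- ===== PORT B =====
-- the body of B's single loop: update (msvc_count, gcc_count, found) with one raw line
def pvStep (st : Int × Int × PySem.Set String) (line : String) : Int × Int × PySem.Set String :=
  let line := PySem.Str.strip line
  if line = "" then st
  else
    let m := if PySem.Str.startswith line "?" then st.1 + 1 else st.1
    let g := if PySem.Str.startswith line "_Z" then st.2.1 + 1 else st.2.1
    let f := pvKeySymbols.foldl (fun f symbol =>
        if PySem.Str.isIn symbol line then PySem.Set.add f symbol else f) st.2.2
    (m, g, f)

def check_exports_for_msvc_mangling_alt (exports_text : String) : Bool × String :=
  let st := ((PySem.Str.split? (PySem.Str.strip exports_text) "\n").getD []).foldl pvStep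
      (0, 0, PySem.Set.empty)
  let msvc_count := st.1
  let gcc_count := st.2.1
  let found := st.2.2
  if msvc_count < 100 then
    (false, "Not enough MSVC-mangled exports (need 100+, got " ++ PySem.Int.toStr msvc_count ++ ")")
  else if gcc_count > 0 then
    (false, "Found " ++ PySem.Int.toStr gcc_count ++ " GCC-mangled exports")
  else
    let missing := pvKeySymbols.filter (fun s => !(PySem.Set.contains found s))
    if missing ≠ [] then
      (false, "Missing key symbols: " ++ PySem.Str.join ", " missing)
    else
      (true, "OK: " ++ PySem.Int.toStr msvc_count ++ " MSVC, " ++ PySem.Int.toStr gcc_count ++ " GCC, all keys present")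

-- ===== PRECONDITION & SPEC =====
def Spec_check_exports_for_msvc_mangling (exports_text : String) (out : Bool × String) : Prop := out = check_exports_for_msvc_mangling_alt exports_text
instance (exports_text : String) (out : Bool × String) : Decidable (Spec_check_exports_for_msvc_mangling exports_text out) := by unfold Spec_check_exports_for_msvc_mangling; infer_instance

-- ===== CLAIM (what is proved, stated in full; the proofs are below) =====
def Claim_equal_check_exports_for_msvc_mangling : Prop := ∀ (exports_text : String), Dom_check_exports_for_msvc_mangling exports_text → Spec_check_exports_for_msvc_mangling exports_text (check_exports_for_msvc_mangling exports_text)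

-- ===== LEMMAS AND PROOFS =====

-- the stripped non-empty lines, as a filterMap
def pvExports (lines : List String) : List String :=
  lines.filterMap (fun l => let l' := PySem.Str.strip l; if l' = "" then none else some l')

-- A's parse loop builds exactly pvExports
theorem pvA_exports (lines : List String) (acc : List String) :
    lines.foldl (fun acc line =>
        let line := PySem.Str.strip line
        if line = "" then acc else acc ++ [line]) acc = acc ++ pvExports lines := by
  induction lines generalizing acc with
  | nil => simp [pvExports]
  | cons l ls ih =>
      simp only [List.foldl_cons, pvExports, List.filterMap_cons]
      by_cases h : PySem.Str.strip l = "" <;> simp [h, ih, pvExports]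

-- a counting fold is countP
theorem pvCount (p : String → Bool) (E : List String) (n : Int) :
    E.foldl (fun n e => n + if p e then 1 else 0) n = n + (E.countP p : Int) := by
  induction E generalizing n with
  | nil => simp
  | cons e E ih =>
      rw [List.foldl_cons, ih, List.countP_cons]
      by_cases h : p e <;> simp [h] <;> push_cast <;> omega

theorem pvContains_add (f : PySem.Set String) (x y : String) :
    PySem.Set.contains (PySem.Set.add f x) y = (PySem.Set.contains f y || y == x) := by
  by_cases hx : x ∈ f <;> by_cases hy : y = x <;>
    simp [PySem.Set.add, PySem.Set.contains, hx, hy, List.mem_append]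

-- the inner key-symbol loop of B, seen through Set.contains
theorem pvFound_line (line : String) (ks : List String) (f : PySem.Set String) (s : String) :
    PySem.Set.contains (ks.foldl (fun f symbol =>
        if PySem.Str.isIn symbol line then PySem.Set.add f symbol else f) f) s
      = (PySem.Set.contains f s || (ks.contains s && PySem.Str.isIn s line)) := by
  induction ks generalizing f with
  | nil => simp
  | cons k ks ih =>
      simp only [List.foldl_cons, List.contains_cons]
      by_cases hk : PySem.Str.isIn k line = true
      · rw [if_pos hk, ih, pvContains_add]
        by_cases hs : s = k
        · subst hs
          simp only [PySem.Str.isIn_eq] at hk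
          simp [hk]
        · have hb : (s == k) = false := by simp [hs]
          simp [hb]
      · rw [if_neg hk, ih]
        by_cases hs : s = k
        · subst hs
          have hk' : PySem.Chars.isIn s.toList line.toList = false := by
            rw [← PySem.Str.isIn_eq]; exact Bool.not_eq_true _ ▸ eq_false_of_ne_true hk
          simp [hk']
        · have hb : (s == k) = false := by simp [hs]
          simp [hb]

-- B's single pass computes the two countPs and a found-set whose contains-test is the any-scan
theorem pvB_state (lines : List String) (m g : Int) (f : PySem.Set String) :
    (lines.foldl pvStep (m, g, f)).1
        = m + ((pvExports lines).countP (fun e => PySem.Str.startswith e "?") : Int)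
  ∧ (lines.foldl pvStep (m, g, f)).2.1
        = g + ((pvExports lines).countP (fun e => PySem.Str.startswith e "_Z") : Int)
  ∧ ∀ s, PySem.Set.contains (lines.foldl pvStep (m, g, f)).2.2 s
        = (PySem.Set.contains f s ||
           (pvKeySymbols.contains s && (pvExports lines).any (fun e => PySem.Str.isIn s e))) := by
  induction lines generalizing m g f with
  | nil => simp [pvExports]
  | cons l ls ih =>
      by_cases h : PySem.Str.strip l = ""
      · have hstep : pvStep (m, g, f) l = (m, g, f) := by simp [pvStep, h]
        have hE : pvExports (l :: ls) = pvExports ls := by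
          simp [pvExports, h]
        rw [List.foldl_cons, hstep, hE]
        exact ih m g f
      · have hstep : pvStep (m, g, f) l =
            (if PySem.Str.startswith (PySem.Str.strip l) "?" then m + 1 else m,
             if PySem.Str.startswith (PySem.Str.strip l) "_Z" then g + 1 else g,
             pvKeySymbols.foldl (fun f symbol =>
                 if PySem.Str.isIn symbol (PySem.Str.strip l) then PySem.Set.add f symbol else f) f) := by
          simp [pvStep, h]
        have hE : pvExports (l :: ls) = PySem.Str.strip l :: pvExports ls := by
          simp [pvExports, h]
        rw [List.foldl_cons, hstep, hE]
        obtain ⟨ih1, ih2, ih3⟩ := ih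
          (if PySem.Str.startswith (PySem.Str.strip l) "?" then m + 1 else m)
          (if PySem.Str.startswith (PySem.Str.strip l) "_Z" then g + 1 else g)
          (pvKeySymbols.foldl (fun f symbol =>
              if PySem.Str.isIn symbol (PySem.Str.strip l) then PySem.Set.add f symbol else f) f)
        refine ⟨?_, ?_, ?_⟩
        · rw [ih1, List.countP_cons]
          by_cases h1 : PySem.Str.startswith (PySem.Str.strip l) "?" = true
          · rw [if_pos h1, if_pos h1]; push_cast; ring
          · rw [if_neg h1, if_neg h1]; push_cast; ring
        · rw [ih2, List.countP_cons]
          by_cases h1 : PySem.Str.startswith (PySem.Str.strip l) "_Z" = true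
          · rw [if_pos h1, if_pos h1]; push_cast; ring
          · rw [if_neg h1, if_neg h1]; push_cast; ring
        · intro s
          rw [ih3 s, pvFound_line, List.any_cons]
          cases hc : PySem.Set.contains f s <;>
          cases hm : pvKeySymbols.contains s <;>
          cases hi : PySem.Str.isIn s (PySem.Str.strip l) <;>
            simp [hc, hm, hi]

-- A's missing loop is a filter over pvKeySymbols
theorem pvA_missing (E : List String) :
    pvKeySymbols.foldl (fun acc symbol =>
        if E.any (fun e => PySem.Str.isIn symbol e) then acc else acc ++ [symbol]) []
      = pvKeySymbols.filter (fun s => !(E.any (fun e => PySem.Str.isIn s e))) := by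
  have hfi := PySem.List.foldl_append_if
      (fun s => !(E.any (fun e => PySem.Str.isIn s e))) (fun s => s) pvKeySymbols []
  simp only [List.map_id', List.nil_append] at hfi
  rw [← hfi]
  apply PySem.List.foldl_congr_mem
  intro acc x _
  cases hx : E.any (fun e => PySem.Str.isIn x e) <;> simp [hx]

-- ===== VERDICT (by name: the statement is the Claim_ definition above) =====
theorem check_exports_for_msvc_mangling_spec : Claim_equal_check_exports_for_msvc_mangling := by
  intro t _
  unfold Spec_check_exports_for_msvc_mangling
  unfold check_exports_for_msvc_mangling check_exports_for_msvc_mangling_alt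
  simp only []
  generalize (PySem.Str.split? (PySem.Str.strip t) "\n").getD [] = L
  rw [pvA_exports L []]
  simp only [List.nil_append]
  rw [pvCount, pvCount]
  simp only [zero_add]
  obtain ⟨h1, h2, h3⟩ := pvB_state L 0 0 PySem.Set.empty
  simp only [zero_add] at h1 h2
  rw [h1, h2]
  have hmiss :
      pvKeySymbols.foldl (fun acc symbol =>
          if (pvExports L).any (fun e => PySem.Str.isIn symbol e) then acc else acc ++ [symbol]) []
        = pvKeySymbols.filter (fun s =>
            !(PySem.Set.contains (L.foldl pvStep (0, 0, PySem.Set.empty)).2.2 s)) := by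
    rw [pvA_missing]
    apply List.filter_congr
    intro s hs
    have hks : pvKeySymbols.contains s = true := List.contains_iff_mem.mpr hs
    have hemp : PySem.Set.contains PySem.Set.empty s = false := rfl
    rw [h3 s, hemp, hks]
    simp
  rw [← hmiss]
  rfl
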